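-- pv_equiv track=rewrite | github.com/xvrrr/Hybrid-expert-system-for-tourism | main.py | formatKey
-- ===== SOURCE A (Python) =====
-- def formatKey(key):
--   words = key.split()
--
--   temp = []
--   for word in words:
--     if word == "-":
--       break
--     else:
--       temp.append(word)
--
--   return " ".join(temp)
-- ===== SOURCE B (Python) =====
-- def formatKey(key):
--   def go(ws):
--     if not ws or ws[0] == "-":
--       return ""
--     if len(ws) == 1 or ws[1] == "-":
--       return ws[0]
--     return ws[0] + " " + go(ws[1:])
--   return go(key.split())
-- ===== Notes on version B (the rewrite author's own statement) =====
-- stated objective: alternative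
-- what changed: B recurses over the word list and builds the result string directly by concatenation with separators (looking one word ahead to decide whether another separator is needed), instead of A's iterative loop that accumulates a temp list and joins it at the end.
import Mathlib
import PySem

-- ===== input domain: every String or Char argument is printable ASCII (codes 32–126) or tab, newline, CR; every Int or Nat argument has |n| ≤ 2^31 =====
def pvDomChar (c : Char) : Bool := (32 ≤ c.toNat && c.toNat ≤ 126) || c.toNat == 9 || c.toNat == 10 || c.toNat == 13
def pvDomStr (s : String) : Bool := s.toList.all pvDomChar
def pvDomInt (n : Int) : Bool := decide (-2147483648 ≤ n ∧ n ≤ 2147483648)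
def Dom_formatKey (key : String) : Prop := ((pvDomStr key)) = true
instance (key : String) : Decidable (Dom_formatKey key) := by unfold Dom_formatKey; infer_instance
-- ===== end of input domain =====

-- B recurses over the word list and builds the result string directly by concatenation (one-word lookahead for the separator), instead of A's list-accumulating loop followed by a join: alternative decomposition, same cost.

-- ===== PORT A =====
-- the for-loop with break, over the remaining words and the accumulator temp
def formatKeyLoop : List String → List String → List String
  | [], temp => temp
  | w :: ws, temp => if w = "-" then temp else formatKeyLoop ws (temp ++ [w])

def formatKey (key : String) : String :=
  let words := PySem.Str.split₀ key
  PySem.Str.join " " (formatKeyLoop words [])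

-- ===== PORT B =====
-- go(ws): "" when ws is empty or starts with "-"; just ws[0] when the next word is absent or "-"; else ws[0] + " " + go(ws[1:])
def formatKeyGo : List String → String
  | [] => ""
  | w :: ws =>
    if w = "-" then ""
    else
      match ws with
      | [] => w
      | w2 :: _ => if w2 = "-" then w else w ++ " " ++ formatKeyGo ws

def formatKey_alt (key : String) : String :=
  formatKeyGo (PySem.Str.split₀ key)

-- ===== PRECONDITION & SPEC =====
def Spec_formatKey (key : String) (out : String) : Prop := out = formatKey_alt key
instance (key : String) (out : String) : Decidable (Spec_formatKey key out) := by unfold Spec_formatKey; infer_instance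

-- ===== CLAIM (what is proved, stated in full; the proofs are below) =====
def Claim_equal_formatKey : Prop := ∀ (key : String), Dom_formatKey key → Spec_formatKey key (formatKey key)

-- ===== LEMMAS AND PROOFS =====
lemma formatKeyLoop_eq_takeWhile (ws temp : List String) :
    formatKeyLoop ws temp = temp ++ ws.takeWhile (fun w => !(w == "-")) := by
  induction ws generalizing temp with
  | nil => simp [formatKeyLoop]
  | cons w ws ih =>
    by_cases h : w = "-"
    · subst h; simp [formatKeyLoop]
    · simp [formatKeyLoop, h, ih]

lemma strJoin_cons_cons (sep p q : String) (rest : List String) :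
    PySem.Str.join sep (p :: q :: rest) = p ++ sep ++ PySem.Str.join sep (q :: rest) := by
  simp [PySem.Str.join, PySem.Chars.join_cons_cons, String.ofList_append,
    String.ofList_toList, String.append_assoc]

lemma strJoin_singleton (sep p : String) :
    PySem.Str.join sep [p] = p := by
  simp [PySem.Str.join, PySem.Chars.join_singleton, String.ofList_toList]

lemma strJoin_takeWhile_eq_go (ws : List String) :
    PySem.Str.join " " (ws.takeWhile (fun w => !(w == "-"))) = formatKeyGo ws := by
  induction ws with
  | nil => rfl
  | cons w ws ih =>
    by_cases h : w = "-"
    · subst h; rfl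
    · cases ws with
      | nil => simp [formatKeyGo, h, strJoin_singleton]
      | cons w2 rest =>
        rw [List.takeWhile_cons_of_pos (by simp [h])]
        by_cases h2 : w2 = "-"
        · subst h2
          rw [List.takeWhile_cons_of_neg (by simp)]
          simp [formatKeyGo, h, strJoin_singleton]
        · rw [List.takeWhile_cons_of_pos (p := fun w => !(w == "-")) (by simp [h2]),
            strJoin_cons_cons,
            ← List.takeWhile_cons_of_pos (p := fun w => !(w == "-")) (a := w2) (l := rest)
              (by simp [h2]), ih]
          simp [formatKeyGo, h, h2]

-- ===== VERDICT (by name: the statement is the Claim_ definition above) =====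
theorem formatKey_spec : Claim_equal_formatKey := by
  intro key _
  simp only [Spec_formatKey, formatKey, formatKey_alt, formatKeyLoop_eq_takeWhile,
    List.nil_append, strJoin_takeWhile_eq_go]
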